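-- pv_equiv track=rewrite | github.com/ulyssesMonte/prog1-2019-telem-tica | minhasFuncoes_strings.py | AAA
-- ===== SOURCE A (Python) =====
-- def AAA(s): #MINHA VERSÃO DO UPPER
--   S=""
--   for i in s:
--     if i =="a":
--       S=S+"A"
--     elif i =="b":
--       S=S+"B"
--     elif i =="c":
--       S=S+"C"
--     elif i =="d":
--       S=S+"D"
--     elif i =="e":
--       S=S+"E"
--     elif i =="f":
--       S=S+"F"
--     elif i =="g":
--       S=S+"G"
--     elif i =="h":
--       S=S+"H"
--     elif i =="i":
--       S=S+"I"
--     elif i =="j":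
--       S=S+"J"
--     elif i =="k":
--       S=S+"K"
--     elif i =="l":
--       S=S+"L"
--     elif i =="m":
--       S=S+"M"
--     elif i =="n":
--       S=S+"N"
--     elif i =="o":
--       S=S+"O"
--     elif i =="p":
--       S=S+"P"
--     elif i =="q":
--       S=S+"Q"
--     elif i =="r":
--       S=S+"R"
--     elif i =="s":
--       S=S+"S"
--     elif i =="t":
--       S=S+"T"
--     elif i =="u":
--       S=S+"U"
--     elif i =="v":
--       S=S+"V"
--     elif i =="w":
--       S=S+"W"
--     elif i =="x":
--       S=S+"X"
--     elif i =="y":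
--       S=S+"Y"
--     elif i =="z":
--       S=S+"Z"
--   return S
-- ===== SOURCE B (Python) =====
-- def AAA(s):
--     return ''.join(chr(ord(i) - 32) for i in s if 'a' <= i <= 'z')
-- ===== Notes on version B (the rewrite author's own statement) =====
-- stated objective: simpler
-- what changed: Replaces the 26-way elif comparison table with a single generator expression that tests whether the character lies in the ASCII lowercase range and uppercases it by the closed-form code shift chr(ord(i)-32).
import Mathlib
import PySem

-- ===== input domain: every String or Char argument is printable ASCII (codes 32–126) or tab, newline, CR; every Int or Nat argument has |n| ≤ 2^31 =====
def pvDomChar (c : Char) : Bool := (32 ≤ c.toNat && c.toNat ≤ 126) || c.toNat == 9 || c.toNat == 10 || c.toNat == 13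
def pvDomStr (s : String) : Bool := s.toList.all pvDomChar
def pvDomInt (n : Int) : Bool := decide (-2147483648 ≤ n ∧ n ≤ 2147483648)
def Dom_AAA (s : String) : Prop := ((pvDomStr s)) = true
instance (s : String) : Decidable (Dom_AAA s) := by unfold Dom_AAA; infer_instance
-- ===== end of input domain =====

-- B replaces A's 26-way elif comparison table by a single ASCII range check with the closed-form code shift (simpler).


-- ===== PORT A =====
-- one loop body of A: the 26-way elif chain, in source order
def pvStepA (S : String) (i : Char) : String :=
  if i == 'a' then S ++ "A"
  else if i == 'b' then S ++ "B"
  else if i == 'c' then S ++ "C"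
  else if i == 'd' then S ++ "D"
  else if i == 'e' then S ++ "E"
  else if i == 'f' then S ++ "F"
  else if i == 'g' then S ++ "G"
  else if i == 'h' then S ++ "H"
  else if i == 'i' then S ++ "I"
  else if i == 'j' then S ++ "J"
  else if i == 'k' then S ++ "K"
  else if i == 'l' then S ++ "L"
  else if i == 'm' then S ++ "M"
  else if i == 'n' then S ++ "N"
  else if i == 'o' then S ++ "O"
  else if i == 'p' then S ++ "P"
  else if i == 'q' then S ++ "Q"
  else if i == 'r' then S ++ "R"
  else if i == 's' then S ++ "S"
  else if i == 't' then S ++ "T"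
  else if i == 'u' then S ++ "U"
  else if i == 'v' then S ++ "V"
  else if i == 'w' then S ++ "W"
  else if i == 'x' then S ++ "X"
  else if i == 'y' then S ++ "Y"
  else if i == 'z' then S ++ "Z"
  else S

def AAA (s : String) : String := s.toList.foldl pvStepA ""

-- ===== PORT B =====
-- B's per-character test-and-shift (the generator expression's body)
def pvF (i : Char) : Option Char :=
  if 'a' ≤ i ∧ i ≤ 'z' then some (Char.ofNat (i.toNat - 32)) else none

def AAA_alt (s : String) : String := String.ofList (s.toList.filterMap pvF)

-- ===== PRECONDITION & SPEC =====
def Spec_AAA (s : String) (out : String) : Prop := out = AAA_alt s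
instance (s : String) (out : String) : Decidable (Spec_AAA s out) := by unfold Spec_AAA; infer_instance

-- ===== CLAIM (what is proved, stated in full; the proofs are below) =====
def Claim_equal_AAA : Prop := ∀ (s : String), Dom_AAA s → Spec_AAA s (AAA s)

-- ===== LEMMAS AND PROOFS =====
theorem pvNe_toNat (c d : Char) (h : ¬ c = d) : c.toNat ≠ d.toNat := by
  intro hn; exact h (Char.ext (UInt32.toNat_inj.mp hn))

theorem pvLe_a (c : Char) : ('a' ≤ c) ↔ 97 ≤ c.toNat := by
  rw [Char.le_def, UInt32.le_iff_toNat_le]; rfl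

theorem pvLe_z (c : Char) : (c ≤ 'z') ↔ c.toNat ≤ 122 := by
  rw [Char.le_def, UInt32.le_iff_toNat_le]; rfl

theorem pvStepA_toList (S : String) (c : Char) :
    (pvStepA S c).toList = S.toList ++ (pvF c).toList := by
  unfold pvStepA
  by_cases h1 : (c == 'a') = true
  · rw [if_pos h1]
    rw [beq_iff_eq] at h1; subst h1
    simp [String.toList_append, show pvF 'a' = some 'A' from by decide]
  rw [if_neg h1]
  by_cases h2 : (c == 'b') = true
  · rw [if_pos h2]
    rw [beq_iff_eq] at h2; subst h2
    simp [String.toList_append, show pvF 'b' = some 'B' from by decide]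
  rw [if_neg h2]
  by_cases h3 : (c == 'c') = true
  · rw [if_pos h3]
    rw [beq_iff_eq] at h3; subst h3
    simp [String.toList_append, show pvF 'c' = some 'C' from by decide]
  rw [if_neg h3]
  by_cases h4 : (c == 'd') = true
  · rw [if_pos h4]
    rw [beq_iff_eq] at h4; subst h4
    simp [String.toList_append, show pvF 'd' = some 'D' from by decide]
  rw [if_neg h4]
  by_cases h5 : (c == 'e') = true
  · rw [if_pos h5]
    rw [beq_iff_eq] at h5; subst h5
    simp [String.toList_append, show pvF 'e' = some 'E' from by decide]
  rw [if_neg h5]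
  by_cases h6 : (c == 'f') = true
  · rw [if_pos h6]
    rw [beq_iff_eq] at h6; subst h6
    simp [String.toList_append, show pvF 'f' = some 'F' from by decide]
  rw [if_neg h6]
  by_cases h7 : (c == 'g') = true
  · rw [if_pos h7]
    rw [beq_iff_eq] at h7; subst h7
    simp [String.toList_append, show pvF 'g' = some 'G' from by decide]
  rw [if_neg h7]
  by_cases h8 : (c == 'h') = true
  · rw [if_pos h8]
    rw [beq_iff_eq] at h8; subst h8
    simp [String.toList_append, show pvF 'h' = some 'H' from by decide]
  rw [if_neg h8]
  by_cases h9 : (c == 'i') = true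
  · rw [if_pos h9]
    rw [beq_iff_eq] at h9; subst h9
    simp [String.toList_append, show pvF 'i' = some 'I' from by decide]
  rw [if_neg h9]
  by_cases h10 : (c == 'j') = true
  · rw [if_pos h10]
    rw [beq_iff_eq] at h10; subst h10
    simp [String.toList_append, show pvF 'j' = some 'J' from by decide]
  rw [if_neg h10]
  by_cases h11 : (c == 'k') = true
  · rw [if_pos h11]
    rw [beq_iff_eq] at h11; subst h11
    simp [String.toList_append, show pvF 'k' = some 'K' from by decide]
  rw [if_neg h11]
  by_cases h12 : (c == 'l') = true
  · rw [if_pos h12]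
    rw [beq_iff_eq] at h12; subst h12
    simp [String.toList_append, show pvF 'l' = some 'L' from by decide]
  rw [if_neg h12]
  by_cases h13 : (c == 'm') = true
  · rw [if_pos h13]
    rw [beq_iff_eq] at h13; subst h13
    simp [String.toList_append, show pvF 'm' = some 'M' from by decide]
  rw [if_neg h13]
  by_cases h14 : (c == 'n') = true
  · rw [if_pos h14]
    rw [beq_iff_eq] at h14; subst h14
    simp [String.toList_append, show pvF 'n' = some 'N' from by decide]
  rw [if_neg h14]
  by_cases h15 : (c == 'o') = true
  · rw [if_pos h15]
    rw [beq_iff_eq] at h15; subst h15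
    simp [String.toList_append, show pvF 'o' = some 'O' from by decide]
  rw [if_neg h15]
  by_cases h16 : (c == 'p') = true
  · rw [if_pos h16]
    rw [beq_iff_eq] at h16; subst h16
    simp [String.toList_append, show pvF 'p' = some 'P' from by decide]
  rw [if_neg h16]
  by_cases h17 : (c == 'q') = true
  · rw [if_pos h17]
    rw [beq_iff_eq] at h17; subst h17
    simp [String.toList_append, show pvF 'q' = some 'Q' from by decide]
  rw [if_neg h17]
  by_cases h18 : (c == 'r') = true
  · rw [if_pos h18]
    rw [beq_iff_eq] at h18; subst h18
    simp [String.toList_append, show pvF 'r' = some 'R' from by decide]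
  rw [if_neg h18]
  by_cases h19 : (c == 's') = true
  · rw [if_pos h19]
    rw [beq_iff_eq] at h19; subst h19
    simp [String.toList_append, show pvF 's' = some 'S' from by decide]
  rw [if_neg h19]
  by_cases h20 : (c == 't') = true
  · rw [if_pos h20]
    rw [beq_iff_eq] at h20; subst h20
    simp [String.toList_append, show pvF 't' = some 'T' from by decide]
  rw [if_neg h20]
  by_cases h21 : (c == 'u') = true
  · rw [if_pos h21]
    rw [beq_iff_eq] at h21; subst h21
    simp [String.toList_append, show pvF 'u' = some 'U' from by decide]
  rw [if_neg h21]
  by_cases h22 : (c == 'v') = true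
  · rw [if_pos h22]
    rw [beq_iff_eq] at h22; subst h22
    simp [String.toList_append, show pvF 'v' = some 'V' from by decide]
  rw [if_neg h22]
  by_cases h23 : (c == 'w') = true
  · rw [if_pos h23]
    rw [beq_iff_eq] at h23; subst h23
    simp [String.toList_append, show pvF 'w' = some 'W' from by decide]
  rw [if_neg h23]
  by_cases h24 : (c == 'x') = true
  · rw [if_pos h24]
    rw [beq_iff_eq] at h24; subst h24
    simp [String.toList_append, show pvF 'x' = some 'X' from by decide]
  rw [if_neg h24]
  by_cases h25 : (c == 'y') = true
  · rw [if_pos h25]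
    rw [beq_iff_eq] at h25; subst h25
    simp [String.toList_append, show pvF 'y' = some 'Y' from by decide]
  rw [if_neg h25]
  by_cases h26 : (c == 'z') = true
  · rw [if_pos h26]
    rw [beq_iff_eq] at h26; subst h26
    simp [String.toList_append, show pvF 'z' = some 'Z' from by decide]
  rw [if_neg h26]
  -- no branch matched: c is not a lowercase letter, so pvF c = none
  have n1 : c.toNat ≠ 97 := pvNe_toNat c 'a' (by simpa [beq_iff_eq] using h1)
  have n2 : c.toNat ≠ 98 := pvNe_toNat c 'b' (by simpa [beq_iff_eq] using h2)
  have n3 : c.toNat ≠ 99 := pvNe_toNat c 'c' (by simpa [beq_iff_eq] using h3)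
  have n4 : c.toNat ≠ 100 := pvNe_toNat c 'd' (by simpa [beq_iff_eq] using h4)
  have n5 : c.toNat ≠ 101 := pvNe_toNat c 'e' (by simpa [beq_iff_eq] using h5)
  have n6 : c.toNat ≠ 102 := pvNe_toNat c 'f' (by simpa [beq_iff_eq] using h6)
  have n7 : c.toNat ≠ 103 := pvNe_toNat c 'g' (by simpa [beq_iff_eq] using h7)
  have n8 : c.toNat ≠ 104 := pvNe_toNat c 'h' (by simpa [beq_iff_eq] using h8)
  have n9 : c.toNat ≠ 105 := pvNe_toNat c 'i' (by simpa [beq_iff_eq] using h9)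
  have n10 : c.toNat ≠ 106 := pvNe_toNat c 'j' (by simpa [beq_iff_eq] using h10)
  have n11 : c.toNat ≠ 107 := pvNe_toNat c 'k' (by simpa [beq_iff_eq] using h11)
  have n12 : c.toNat ≠ 108 := pvNe_toNat c 'l' (by simpa [beq_iff_eq] using h12)
  have n13 : c.toNat ≠ 109 := pvNe_toNat c 'm' (by simpa [beq_iff_eq] using h13)
  have n14 : c.toNat ≠ 110 := pvNe_toNat c 'n' (by simpa [beq_iff_eq] using h14)
  have n15 : c.toNat ≠ 111 := pvNe_toNat c 'o' (by simpa [beq_iff_eq] using h15)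
  have n16 : c.toNat ≠ 112 := pvNe_toNat c 'p' (by simpa [beq_iff_eq] using h16)
  have n17 : c.toNat ≠ 113 := pvNe_toNat c 'q' (by simpa [beq_iff_eq] using h17)
  have n18 : c.toNat ≠ 114 := pvNe_toNat c 'r' (by simpa [beq_iff_eq] using h18)
  have n19 : c.toNat ≠ 115 := pvNe_toNat c 's' (by simpa [beq_iff_eq] using h19)
  have n20 : c.toNat ≠ 116 := pvNe_toNat c 't' (by simpa [beq_iff_eq] using h20)
  have n21 : c.toNat ≠ 117 := pvNe_toNat c 'u' (by simpa [beq_iff_eq] using h21)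
  have n22 : c.toNat ≠ 118 := pvNe_toNat c 'v' (by simpa [beq_iff_eq] using h22)
  have n23 : c.toNat ≠ 119 := pvNe_toNat c 'w' (by simpa [beq_iff_eq] using h23)
  have n24 : c.toNat ≠ 120 := pvNe_toNat c 'x' (by simpa [beq_iff_eq] using h24)
  have n25 : c.toNat ≠ 121 := pvNe_toNat c 'y' (by simpa [beq_iff_eq] using h25)
  have n26 : c.toNat ≠ 122 := pvNe_toNat c 'z' (by simpa [beq_iff_eq] using h26)
  have hnone : pvF c = none := by
    unfold pvF
    rw [if_neg]
    rw [pvLe_a, pvLe_z]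
    omega
  simp [hnone]

theorem pv_main (l : List Char) (S : String) :
    (l.foldl pvStepA S).toList = S.toList ++ l.filterMap pvF := by
  induction l generalizing S with
  | nil => simp
  | cons c t ih =>
    simp only [List.foldl_cons, List.filterMap_cons, ih, pvStepA_toList]
    cases h : pvF c
    · simp
    · simp

-- ===== VERDICT (by name: the statement is the Claim_ definition above) =====
theorem AAA_spec : Claim_equal_AAA := by
  intro s _
  unfold Spec_AAA AAA AAA_alt
  apply String.toList_inj.mp
  rw [pv_main, String.toList_ofList]
  simp
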